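-- pv_equiv track=rewrite | github.com/yatuk/SOC-case-study-project | src/normalize/families/phishing_iocs.py | detect_family_csv
-- ===== SOURCE A (Python) =====
-- from typing import Dict, Optional, List
--
-- def detect_family_csv(headers: List[str]) -> bool:
--     """Check if this CSV is a phishing URL dataset."""
--     headers_lower = [h.lower() for h in headers]
--
--     indicators = [
--         'url' in headers_lower,
--         'label' in headers_lower,
--         any('phish' in h for h in headers_lower),
--         'source' in headers_lower,
--     ]
--     return sum(indicators) >= 2
-- ===== SOURCE B (Python) =====
-- def detect_family_csv(headers):
--     """Check if this CSV is a phishing URL dataset."""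
--     need_exact = ['url', 'label', 'source']
--     need_phish = True
--     count = 0
--     for h in headers:
--         if count >= 2:
--             return True
--         hl = h.lower()
--         if hl in need_exact:
--             need_exact = [x for x in need_exact if x != hl]
--             count += 1
--         if need_phish and 'phish' in hl:
--             need_phish = False
--             count += 1
--     return count >= 2
-- ===== Notes on version B (the rewrite author's own statement) =====
-- stated objective: alternative
-- what changed: Instead of A's four independent whole-list scans summed at the end, B walks the headers once maintaining a shrinking list of still-unmatched exact categories and a pending phish flag, incrementing a counter as categories are consumed and returning True early as soon as two categories are satisfied.
import Mathlib
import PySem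

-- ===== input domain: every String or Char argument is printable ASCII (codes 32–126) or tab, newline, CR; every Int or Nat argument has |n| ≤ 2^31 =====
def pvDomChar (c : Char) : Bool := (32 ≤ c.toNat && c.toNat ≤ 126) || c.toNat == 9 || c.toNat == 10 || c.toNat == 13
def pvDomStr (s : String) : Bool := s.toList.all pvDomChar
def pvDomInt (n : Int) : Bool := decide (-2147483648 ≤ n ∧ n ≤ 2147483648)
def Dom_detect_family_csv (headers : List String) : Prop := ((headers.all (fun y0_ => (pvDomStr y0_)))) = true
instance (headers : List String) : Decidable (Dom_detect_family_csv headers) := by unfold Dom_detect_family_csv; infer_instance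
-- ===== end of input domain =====

-- B replaces A's four whole-list scans + sum by a single early-exiting pass that consumes
-- categories from a shrinking candidate list (alternative decomposition, same cost).

-- ===== PORT A =====
-- A: lower all headers, build the four indicator booleans, sum them, compare with 2.
def detect_family_csv (headers : List String) : Bool :=
  let headers_lower := headers.map PySem.Str.lower
  let indicators : List Bool :=
    [headers_lower.contains "url",
     headers_lower.contains "label",
     headers_lower.any (fun h => PySem.Str.isIn "phish" h),
     headers_lower.contains "source"]
  decide (2 ≤ (indicators.map (fun b => if b then (1 : Int) else 0)).sum)

-- ===== PORT B =====
-- B's loop: early return when count reaches 2; otherwise lower the header, consume it from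
-- the remaining exact-category list and/or the pending phish flag, and recurse on the tail.
def pvGoB : List String → List String → Bool → Int → Bool
  | [], _, _, c => decide (2 ≤ c)
  | h :: t, ne, ph, c =>
    if 2 ≤ c then true
    else
      let hl := PySem.Str.lower h
      let (ne', c1) := if ne.contains hl then (ne.filter (fun x => x != hl), c + 1) else (ne, c)
      let (ph', c2) := if ph && PySem.Str.isIn "phish" hl then (false, c1 + 1) else (ph, c1)
      pvGoB t ne' ph' c2

def detect_family_csv_alt (headers : List String) : Bool :=
  pvGoB headers ["url", "label", "source"] true 0

-- ===== PRECONDITION & SPEC =====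
def Spec_detect_family_csv (headers : List String) (out : Bool) : Prop := out = detect_family_csv_alt headers
instance (headers : List String) (out : Bool) : Decidable (Spec_detect_family_csv headers out) := by unfold Spec_detect_family_csv; infer_instance

-- ===== CLAIM (what is proved, stated in full; the proofs are below) =====
def Claim_equal_detect_family_csv : Prop := ∀ (headers : List String), Dom_detect_family_csv headers → Spec_detect_family_csv headers (detect_family_csv headers)

-- ===== LEMMAS AND PROOFS =====

-- Categories of `ne` still satisfiable in `hs`, plus the phish indicator, as an integer count.
def pvCnt (hs ne : List String) (ph : Bool) : Int :=
  ((ne.filter (fun cat => (hs.map PySem.Str.lower).contains cat)).length : Int)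
  + (if ph && (hs.map PySem.Str.lower).any (fun h => PySem.Str.isIn "phish" h) then 1 else 0)

theorem pvCnt_nonneg (hs ne : List String) (ph : Bool) : 0 ≤ pvCnt hs ne ph := by
  unfold pvCnt; split <;> omega

-- Key counting fact: filtering a duplicate-free list by "equals hl, or q" counts the (at most
-- one) occurrence of hl plus the q-matches among the other elements.
theorem pvFilterKey (hl : String) (q : String → Bool) :
    ∀ ne : List String, ne.Nodup →
    (ne.filter (fun cat => cat == hl || q cat)).length =
      (if ne.contains hl then
        1 + ((ne.filter (fun x => x != hl)).filter q).length
      else (ne.filter q).length) := by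
  intro ne
  induction ne with
  | nil => simp
  | cons a as ih =>
      intro hnd
      rcases List.nodup_cons.mp hnd with ⟨hna, hndas⟩
      by_cases ha : a = hl
      · subst ha
        have hfa : as.filter (fun x => x != a) = as := by
          apply List.filter_eq_self.mpr
          intro x hx
          simp only [bne_iff_ne, ne_eq]
          intro hxa; exact hna (hxa ▸ hx)
        have hq : as.filter (fun cat => cat == a || q cat) = as.filter q := by
          apply List.filter_congr
          intro x hx
          have : ¬ x = a := fun hxa => hna (hxa ▸ hx)
          simp [this]
        simp [hq, hfa, Nat.add_comm]
      · have key := ih hndas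
        have ha' : hl ≠ a := fun e => ha e.symm
        have hpa : (a == hl || q a) = q a := by simp [ha]
        have hba : (a != hl) = true := by simp [ha]
        have hcontains : (a :: as).contains hl = as.contains hl := by
          simp [ha']
        rw [hcontains]
        simp only [List.filter_cons, hpa, hba]
        cases hqa : q a <;>
          by_cases hmem : as.contains hl = true <;>
            simp [hqa, key] <;> split <;> omega

theorem pvFilter_len_cons (h : String) (t ne : List String) (hnd : ne.Nodup) :
    (ne.filter (fun cat => ((h :: t).map PySem.Str.lower).contains cat)).length =
      (if ne.contains (PySem.Str.lower h) then
        1 + ((ne.filter (fun x => x != PySem.Str.lower h)).filter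
              (fun cat => (t.map PySem.Str.lower).contains cat)).length
      else (ne.filter (fun cat => (t.map PySem.Str.lower).contains cat)).length) := by
  have hpred : ne.filter (fun cat => ((h :: t).map PySem.Str.lower).contains cat)
      = ne.filter (fun cat => cat == PySem.Str.lower h || (t.map PySem.Str.lower).contains cat) := by
    apply List.filter_congr
    intro cat _
    simp only [List.map_cons, List.contains_cons]
  rw [hpred, pvFilterKey _ _ ne hnd]

-- Main loop invariant: the early-exiting fold computes "2 ≤ count-so-far + what remains matchable".
theorem pvGoB_eq (hs : List String) : ∀ (ne : List String) (ph : Bool) (c : Int),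
    ne.Nodup → pvGoB hs ne ph c = decide (2 ≤ c + pvCnt hs ne ph) := by
  induction hs with
  | nil =>
      intro ne ph c _
      show decide (2 ≤ c) = _
      unfold pvCnt
      simp
  | cons h t ih =>
      intro ne ph c hnd
      show (if 2 ≤ c then true
        else
          let hl := PySem.Str.lower h
          let (ne', c1) := if ne.contains hl then (ne.filter (fun x => x != hl), c + 1) else (ne, c)
          let (ph', c2) := if ph && PySem.Str.isIn "phish" hl then (false, c1 + 1) else (ph, c1)
          pvGoB t ne' ph' c2) = _
      by_cases hc : 2 ≤ c
      · have := pvCnt_nonneg (h :: t) ne ph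
        simp only [hc, if_true]
        symm
        simpa using by omega
      · simp only [hc, if_false]
        have hsplit := pvFilter_len_cons h t ne hnd
        have hanyT : ∀ (hin : PySem.Str.isIn "phish" (PySem.Str.lower h) = true),
            ((h :: t).map PySem.Str.lower).any (fun x => PySem.Str.isIn "phish" x) = true := by
          intro hin; rw [List.map_cons, List.any_cons, hin, Bool.true_or]
        have hanyF : ∀ (hin : PySem.Str.isIn "phish" (PySem.Str.lower h) = false),
            ((h :: t).map PySem.Str.lower).any (fun x => PySem.Str.isIn "phish" x)
              = (t.map PySem.Str.lower).any (fun x => PySem.Str.isIn "phish" x) := by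
          intro hin; rw [List.map_cons, List.any_cons, hin, Bool.false_or]
        by_cases hex : ne.contains (PySem.Str.lower h) <;>
          by_cases hph : ph && PySem.Str.isIn "phish" (PySem.Str.lower h)
        · rw [if_pos hex, if_pos hph]
          rw [ih _ _ _ (List.Nodup.filter _ hnd)]
          have hphT : ph = true := by cases ph <;> simp_all
          have hin : PySem.Str.isIn "phish" (PySem.Str.lower h) = true := by
            cases hin : PySem.Str.isIn "phish" (PySem.Str.lower h) <;> simp_all
          congr 1
          unfold pvCnt
          rw [hsplit]
          rw [if_pos hex, hanyT hin, hphT]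
          simp only [eq_iff_iff, Bool.false_and, Bool.true_and]
          norm_num
          omega
        · rw [if_pos hex, if_neg (by simpa using hph)]
          rw [ih _ _ _ (List.Nodup.filter _ hnd)]
          congr 1
          unfold pvCnt
          rw [hsplit]
          have heq : (ph && ((h :: t).map PySem.Str.lower).any (fun x => PySem.Str.isIn "phish" x))
               = (ph && (t.map PySem.Str.lower).any (fun x => PySem.Str.isIn "phish" x)) := by
            cases ph
            · simp
            · simp only [Bool.true_and] at hph ⊢
              rw [hanyF (by simpa using hph)]
          rw [heq, if_pos hex, eq_iff_iff]
          push_cast; omega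
        · rw [if_neg hex, if_pos hph]
          rw [ih _ _ _ hnd]
          have hphT : ph = true := by cases ph <;> simp_all
          have hin : PySem.Str.isIn "phish" (PySem.Str.lower h) = true := by
            cases hin : PySem.Str.isIn "phish" (PySem.Str.lower h) <;> simp_all
          congr 1
          unfold pvCnt
          rw [hsplit]
          rw [if_neg hex, hanyT hin, hphT]
          simp only [eq_iff_iff, Bool.false_and, Bool.true_and]
          norm_num
          omega
        · rw [if_neg hex, if_neg (by simpa using hph)]
          rw [ih _ _ _ hnd]
          congr 1
          unfold pvCnt
          rw [hsplit]
          have heq : (ph && ((h :: t).map PySem.Str.lower).any (fun x => PySem.Str.isIn "phish" x))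
               = (ph && (t.map PySem.Str.lower).any (fun x => PySem.Str.isIn "phish" x)) := by
            cases ph
            · simp
            · simp only [Bool.true_and] at hph ⊢
              rw [hanyF (by simpa using hph)]
          rw [heq, if_neg hex, eq_iff_iff]

theorem pvThree (L : List String) :
    ((["url", "label", "source"].filter (fun cat => L.contains cat)).length : Int)
      = (if L.contains "url" then 1 else 0) + (if L.contains "label" then 1 else 0)
        + (if L.contains "source" then 1 else 0) := by
  rw [List.filter_cons, List.filter_cons, List.filter_cons, List.filter_nil]
  split_ifs <;> simp

-- ===== VERDICT (by name: the statement is the Claim_ definition above) =====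
theorem detect_family_csv_spec : Claim_equal_detect_family_csv := by
  intro headers _
  unfold Spec_detect_family_csv detect_family_csv detect_family_csv_alt
  rw [pvGoB_eq headers ["url", "label", "source"] true 0 (by decide)]
  unfold pvCnt
  rw [pvThree]
  simp only [List.map_cons, List.map_nil, List.sum_cons, List.sum_nil, Bool.true_and]
  split_ifs <;> simp
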